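-- pv_equiv track=rewrite | github.com/filippotroiani/AoC | 2021/17.py | calculateYTrajectory
-- ===== SOURCE A (Python) =====
-- def calculateYTrajectory(targetYCoordinates,vely) -> list:  # returns a list of ints, the steps in which the trajectory is inside the target area for the input Y velocity
--     step = 0
--     steps = []
--     y = 0
--     if vely > 0:    # if velY>0 calculate the steps to the highest position
--         tempvely = vely
--         while tempvely != 0:
--             y += tempvely
--             tempvely -= 1
--             step += 1
--         step = step * 2 + 1 # and double it, because you need the same number of steps +1 to return at y = 0
--         y = 0
--         vely = - vely - 1
--     while y >= min(targetYCoordinates):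
--         if y <= max(targetYCoordinates):
--             steps.append(step)
--         y += vely
--         vely -= 1
--         step += 1
--     return steps
-- ===== SOURCE B (Python) =====
-- def calculateYTrajectory(targetYCoordinates, vely) -> list:
--     # Closed-form trajectory: after the probe is back at y=0 with downward
--     # velocity v, its height after k further steps is k*v - k*(k-1)/2.
--     # Find an exclusive step bound by doubling, then emit the in-band steps
--     # by filtering that range with the closed form (doubled to stay integral).
--     lo = min(targetYCoordinates)
--     hi = max(targetYCoordinates)
--     if vely > 0:
--         base, v = 2 * vely + 1, -vely - 1
--     else:
--         base, v = 0, vely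
--     b = 1
--     while 2 * b * v - b * (b - 1) >= 2 * lo:
--         b = 2 * b + 1
--     return [base + k for k in range(b)
--             if 2 * lo <= 2 * k * v - k * (k - 1) <= 2 * hi]
-- ===== Notes on version B (the rewrite author's own statement) =====
-- stated objective: faster
-- what changed: B replaces A's step-by-step trajectory simulation (ascent loop plus descent loop with mutable y/vel/step state) by the closed-form height k*v - k*(k-1)/2: it finds an exclusive step bound by doubling and filters that range with the closed form, so the O(vely)-step ascent simulation disappears entirely.
import Mathlib
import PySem

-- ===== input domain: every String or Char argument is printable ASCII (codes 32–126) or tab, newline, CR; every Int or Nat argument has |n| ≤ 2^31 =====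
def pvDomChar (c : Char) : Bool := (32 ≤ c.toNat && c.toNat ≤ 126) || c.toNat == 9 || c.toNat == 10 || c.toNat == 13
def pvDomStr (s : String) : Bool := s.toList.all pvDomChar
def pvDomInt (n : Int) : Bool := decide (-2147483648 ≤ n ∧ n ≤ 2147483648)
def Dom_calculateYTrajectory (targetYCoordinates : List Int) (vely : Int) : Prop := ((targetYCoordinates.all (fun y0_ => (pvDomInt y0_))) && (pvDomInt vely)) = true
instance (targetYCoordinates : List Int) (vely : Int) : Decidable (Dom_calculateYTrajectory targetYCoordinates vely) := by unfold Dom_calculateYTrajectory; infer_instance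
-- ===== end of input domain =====

-- B replaces A's step-by-step trajectory simulation by the closed-form height
-- k*v - k*(k-1)/2, filtered over a step range found by doubling (no ascent simulation).


-- ===== PORT A =====
-- the ascent loop 'while tempvely != 0: y += tempvely; tempvely -= 1; step += 1';
-- it is only entered with tempvely = vely > 0, so the Nat counter is exact
def calcAscent (y : Int) (tempvely : Nat) (step : Int) : Int × Int :=
  match tempvely with
  | 0 => (y, step)
  | Nat.succ n => calcAscent (y + ((n : Int) + 1)) n (step + 1)

-- the main loop 'while y >= min(...): if y <= max(...): steps.append(step); y += vely; vely -= 1; step += 1'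
-- (min/max of the unchanged list are constant, hoisted out of the condition)
def calcALoop (lo hi : Int) (y v s : Int) : List Int :=
  if lo ≤ y then
    (if y ≤ hi then [s] else []) ++ calcALoop lo hi (y + v) (v - 1) (s + 1)
  else []
termination_by ((v + 1).toNat, (y - lo + 1).toNat)
decreasing_by
  by_cases hv : 0 ≤ v
  · exact Prod.Lex.left _ _ (by omega)
  · have h1 : (v - 1 + 1).toNat = (v + 1).toNat := by omega
    rw [h1]
    exact Prod.Lex.right _ (by omega)

def calculateYTrajectory (targetYCoordinates : List Int) (vely : Int) : List Int :=
  match PySem.List.min? targetYCoordinates (fun x => x), PySem.List.max? targetYCoordinates (fun x => x) with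
  | some lo, some hi =>
    if vely > 0 then
      calcALoop lo hi 0 (-vely - 1) ((calcAscent 0 vely.toNat 0).2 * 2 + 1)
    else
      calcALoop lo hi 0 vely 0
  | _, _ => []  -- min() of an empty list raises ValueError; excluded by Pre_

-- ===== PORT B =====
-- termination bound for the doubling loop (cited by altBound's decreasing_by)
theorem altBound_lt_bound (lo v : Int) (b : Nat) (h : 2 * (b : Int) * v - (b : Int) * ((b : Int) - 1) ≥ 2 * lo) :
    (b : Int) < 2 * v.natAbs + lo.natAbs + 4 := by
  by_contra hcon
  rw [not_lt] at hcon
  have h1 : (b : Int) * v ≤ (b : Int) * v.natAbs := by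
    have hva : v ≤ (v.natAbs : Int) := Int.le_natAbs
    exact mul_le_mul_of_nonneg_left hva (by positivity)
  have h2 : -(lo.natAbs : Int) ≤ lo := by omega
  nlinarith [h1, h2, hcon, h]

-- 'b = 1; while 2*b*v - b*(b-1) >= 2*lo: b = 2*b + 1'; b only holds 1,3,7,…, so Nat is exact
def altBound (lo v : Int) (b : Nat) : Nat :=
  if 2 * (b : Int) * v - (b : Int) * ((b : Int) - 1) ≥ 2 * lo then altBound lo v (2 * b + 1) else b
termination_by (2 * v.natAbs + lo.natAbs + 4) - b
decreasing_by
  have := altBound_lt_bound lo v b (by assumption)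
  omega

def calculateYTrajectory_alt (targetYCoordinates : List Int) (vely : Int) : List Int :=
  match PySem.List.min? targetYCoordinates (fun x => x) with
  | none => []
  | some lo =>
    match PySem.List.max? targetYCoordinates (fun x => x) with
    | none => []
    | some hi =>
      let bv : Int × Int := if vely > 0 then (2 * vely + 1, -vely - 1) else (0, vely)
      let b := altBound lo bv.2 1
      ((PySem.List.pyRange 0 (b : Int) 1).filter
          (fun k => decide (2 * lo ≤ 2 * k * bv.2 - k * (k - 1)) && decide (2 * k * bv.2 - k * (k - 1) ≤ 2 * hi))).map
        (fun k => bv.1 + k)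

-- ===== PRECONDITION & SPEC =====
-- Pre_ excludes only the empty list, on which A's min() raises ValueError
def Pre_calculateYTrajectory (targetYCoordinates : List Int) (vely : Int) : Prop :=
  targetYCoordinates ≠ []
instance (targetYCoordinates : List Int) (vely : Int) : Decidable (Pre_calculateYTrajectory targetYCoordinates vely) := by unfold Pre_calculateYTrajectory; infer_instance

def pvWitness_calculateYTrajectory : List Int × Int := ([-10, -5], 7)

def Spec_calculateYTrajectory (targetYCoordinates : List Int) (vely : Int) (out : List Int) : Prop := out = calculateYTrajectory_alt targetYCoordinates vely
instance (targetYCoordinates : List Int) (vely : Int) (out : List Int) : Decidable (Spec_calculateYTrajectory targetYCoordinates vely out) := by unfold Spec_calculateYTrajectory; infer_instance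

-- ===== CLAIM (what is proved, stated in full; the proofs are below) =====
def Claim_equal_calculateYTrajectory : Prop := ∀ (targetYCoordinates : List Int) (vely : Int), Dom_calculateYTrajectory targetYCoordinates vely → Pre_calculateYTrajectory targetYCoordinates vely → Spec_calculateYTrajectory targetYCoordinates vely (calculateYTrajectory targetYCoordinates vely)

-- ===== LEMMAS AND PROOFS =====

-- height of the probe after k further steps from state (y, v)
def pvPos (y v : Int) : Nat → Int
  | 0 => y
  | k + 1 => pvPos (y + v) (v - 1) k

theorem pvPos_succ (k : Nat) : ∀ (y v : Int), pvPos y v (k + 1) = pvPos y v k + (v - k) := by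
  induction k with
  | zero => intro y v; simp [pvPos]
  | succ n ih =>
    intro y v
    show pvPos (y + v) (v - 1) (n + 1) = pvPos (y + v) (v - 1) n + (v - (n + 1))
    rw [ih (y + v) (v - 1)]
    ring

theorem pvPos_closed (k : Nat) : ∀ (y v : Int), 2 * pvPos y v k = 2 * y + 2 * (k : Int) * v - (k : Int) * ((k : Int) - 1) := by
  induction k with
  | zero => intro y v; simp [pvPos]
  | succ n ih =>
    intro y v
    rw [pvPos_succ]
    have := ih y v
    push_cast at this ⊢
    nlinarith [this]

theorem pvPos_anti (y v : Int) (hv : v ≤ 0) {j k : Nat} (hjk : j ≤ k) : pvPos y v k ≤ pvPos y v j := by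
  induction k with
  | zero => interval_cases j; exact le_refl _
  | succ n ih =>
    rcases Nat.lt_or_ge j (n + 1) with h | h
    · calc pvPos y v (n + 1) ≤ pvPos y v n := by rw [pvPos_succ]; omega
        _ ≤ pvPos y v j := ih (by omega)
    · have : j = n + 1 := by omega
      rw [this]

theorem calcALoop_eq (lo hi : Int) (n : Nat) : ∀ (y v s : Int), v ≤ 0 → pvPos y v n < lo →
    calcALoop lo hi y v s =
      ((List.range n).filter (fun k => decide (lo ≤ pvPos y v k) && decide (pvPos y v k ≤ hi))).map
        (fun k : Nat => s + (k : Int)) := by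
  induction n with
  | zero =>
    intro y v s hv hn
    rw [calcALoop.eq_def]
    rw [if_neg (by simpa [pvPos] using hn)]
    simp
  | succ n ih =>
    intro y v s hv hn
    rw [calcALoop.eq_def]
    by_cases hy : lo ≤ y
    · rw [if_pos hy, ih (y + v) (v - 1) (s + 1) (by omega) hn]
      rw [List.range_succ_eq_map, List.filter_cons, List.filter_map]
      have hcomp : ((fun k => decide (lo ≤ pvPos y v k) && decide (pvPos y v k ≤ hi)) ∘ Nat.succ)
          = fun k : Nat => decide (lo ≤ pvPos (y + v) (v - 1) k) && decide (pvPos (y + v) (v - 1) k ≤ hi) := rfl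
      rw [hcomp]
      have hmap : (List.map Nat.succ ((List.range n).filter
            (fun k : Nat => decide (lo ≤ pvPos (y + v) (v - 1) k) && decide (pvPos (y + v) (v - 1) k ≤ hi)))).map
            (fun k : Nat => s + (k : Int))
          = ((List.range n).filter
            (fun k : Nat => decide (lo ≤ pvPos (y + v) (v - 1) k) && decide (pvPos (y + v) (v - 1) k ≤ hi))).map
            (fun k : Nat => (s + 1) + (k : Int)) := by
        rw [List.map_map]
        congr 1
        funext k
        show s + ((k + 1 : Nat) : Int) = (s + 1) + (k : Int)
        push_cast
        ring
      by_cases hhi : y ≤ hi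
      · rw [if_pos hhi, if_pos (show (decide (lo ≤ pvPos y v 0) && decide (pvPos y v 0 ≤ hi)) = true by simp [pvPos, hy, hhi])]
        rw [List.map_cons, hmap]
        norm_num
      · rw [if_neg hhi, if_neg (show ¬ (decide (lo ≤ pvPos y v 0) && decide (pvPos y v 0 ≤ hi)) = true by simp [pvPos, hhi])]
        rw [hmap]
        simp
    · rw [if_neg hy]
      symm
      rw [List.map_eq_nil_iff, List.filter_eq_nil_iff]
      intro k hk
      have hle : pvPos y v k ≤ pvPos y v 0 := pvPos_anti y v hv (Nat.zero_le k)
      have h0 : pvPos y v 0 = y := rfl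
      simp only [Bool.and_eq_true, decide_eq_true_eq, not_and]
      intro hlo
      omega

theorem calcAscent_snd (n : Nat) : ∀ (y s : Int), (calcAscent y n s).2 = s + n := by
  induction n with
  | zero => intro y s; simp [calcAscent]
  | succ m ih => intro y s; rw [calcAscent, ih]; push_cast; ring

theorem altBound_spec (lo v : Int) : ∀ (b : Nat),
    2 * ((altBound lo v b : Nat) : Int) * v - ((altBound lo v b : Nat) : Int) * (((altBound lo v b : Nat) : Int) - 1) < 2 * lo := by
  intro b
  induction b using altBound.induct lo v with
  | case1 b h ih => rw [altBound.eq_def, if_pos h]; exact ih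
  | case2 b h => rw [altBound.eq_def, if_neg h]; omega

-- B's filtered range equals the same filter/map over List.range with pvPos
theorem alt_eq_filter (lo hi base v : Int) (b : Nat) :
    ((PySem.List.pyRange 0 (b : Int) 1).filter
        (fun k => decide (2 * lo ≤ 2 * k * v - k * (k - 1)) && decide (2 * k * v - k * (k - 1) ≤ 2 * hi))).map
      (fun k => base + k)
    = ((List.range b).filter (fun k => decide (lo ≤ pvPos 0 v k) && decide (pvPos 0 v k ≤ hi))).map
        (fun k : Nat => base + (k : Int)) := by
  rw [PySem.List.pyRange_one, List.filter_map, List.map_map]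
  have ht : ((b : Int) - 0).toNat = b := by omega
  rw [ht]
  have hcond : ((fun k : Int => decide (2 * lo ≤ 2 * k * v - k * (k - 1)) && decide (2 * k * v - k * (k - 1) ≤ 2 * hi)) ∘ (fun k : Nat => (0 : Int) + k))
      = fun k : Nat => decide (lo ≤ pvPos 0 v k) && decide (pvPos 0 v k ≤ hi) := by
    funext k
    have hc := pvPos_closed k 0 v
    simp only [Function.comp, zero_add]
    congr 1 <;> simp only [decide_eq_decide] <;> omega
  rw [hcond]
  have hfun : ((fun k : Int => base + k) ∘ fun k : Nat => (0 : Int) + (k : Int)) = fun k : Nat => base + (k : Int) := by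
    funext k; simp
  rw [hfun]

-- ===== VERDICT (by name: the statement is the Claim_ definition above) =====
theorem calculateYTrajectory_spec : Claim_equal_calculateYTrajectory := by
  intro t vely _ hpre
  unfold Spec_calculateYTrajectory calculateYTrajectory calculateYTrajectory_alt
  obtain ⟨m, hm⟩ : ∃ m, PySem.List.min? t (fun x => x) = some m := by
    cases h : PySem.List.min? t (fun x => x) with
    | none => exact absurd ((PySem.List.min?_eq_none_iff _ _).mp h) hpre
    | some m => exact ⟨m, rfl⟩
  obtain ⟨M, hM⟩ : ∃ M, PySem.List.max? t (fun x => x) = some M := by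
    cases h : PySem.List.max? t (fun x => x) with
    | none => exact absurd ((PySem.List.max?_eq_none_iff _ _).mp h) hpre
    | some M => exact ⟨M, rfl⟩
  rw [hm, hM]
  dsimp only
  by_cases hv : vely > 0
  · rw [if_pos hv, if_pos hv]
    have hb := altBound_spec m (-vely - 1) 1
    rw [calcALoop_eq m M (altBound m (-vely - 1) 1) 0 (-vely - 1) _ (by omega)
        (by have := pvPos_closed (altBound m (-vely - 1) 1) 0 (-vely - 1); omega)]
    rw [alt_eq_filter m M (2 * vely + 1) (-vely - 1) (altBound m (-vely - 1) 1)]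
    congr 1
    funext k
    rw [calcAscent_snd]
    have : (vely.toNat : Int) = vely := by omega
    rw [this]; ring
  · rw [if_neg hv, if_neg hv]
    have hb := altBound_spec m vely 1
    rw [calcALoop_eq m M (altBound m vely 1) 0 vely 0 (by omega)
        (by have := pvPos_closed (altBound m vely 1) 0 vely; omega)]
    rw [alt_eq_filter m M 0 vely (altBound m vely 1)]
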